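-- pv_equiv track=rewrite | github.com/nroll38/mosaic_ictir | kgc/rulen/my_rulen.py | path_check
-- ===== SOURCE A (Python) =====
-- def path_check(s, path, hop, data_s):
--     found = []
--     if len(path) == hop:
--         return [s]
--     r = path[hop]
--     if s in data_s and r in data_s[s]:
--         for o in data_s[s][r]:
--             found += path_check(o, path, hop + 1, data_s)
--     return found
-- ===== SOURCE B (Python) =====
-- def path_check(s, path, hop, data_s):
--     frontier = [s]
--     for h in range(hop, len(path)):
--         r = path[h]
--         frontier = [o for n in frontier for o in data_s.get(n, {}).get(r, [])]
--     return frontier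
-- ===== Notes on version B (the rewrite author's own statement) =====
-- stated objective: simpler
-- what changed: Replaced the per-node recursive DFS (recursing into each neighbour and concatenating sub-results) by a single iterative level-by-level frontier loop over the hops, flat-mapping each frontier through the relation of that hop.
import Mathlib
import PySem

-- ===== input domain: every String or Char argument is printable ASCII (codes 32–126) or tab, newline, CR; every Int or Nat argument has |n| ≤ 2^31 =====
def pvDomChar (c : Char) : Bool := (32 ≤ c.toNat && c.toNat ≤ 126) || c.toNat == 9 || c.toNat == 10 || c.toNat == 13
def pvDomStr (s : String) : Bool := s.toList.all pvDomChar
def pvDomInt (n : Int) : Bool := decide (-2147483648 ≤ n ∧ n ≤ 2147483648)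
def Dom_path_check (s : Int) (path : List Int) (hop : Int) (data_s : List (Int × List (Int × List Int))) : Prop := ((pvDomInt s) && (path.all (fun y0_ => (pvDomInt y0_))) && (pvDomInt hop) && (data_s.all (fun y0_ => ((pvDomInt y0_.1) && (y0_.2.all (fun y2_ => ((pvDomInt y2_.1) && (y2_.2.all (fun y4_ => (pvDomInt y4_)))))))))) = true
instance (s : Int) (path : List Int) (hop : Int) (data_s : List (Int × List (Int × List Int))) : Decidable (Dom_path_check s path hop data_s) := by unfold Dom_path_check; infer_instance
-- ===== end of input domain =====

-- B replaces A's per-node recursive DFS by one iterative level-by-level frontier loop over the hops (simpler, same results).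

-- ===== PORT A =====
-- fuel = (len(path) - hop).toNat only makes the recursion structural; it is never exhausted
-- on a branch Python reaches (path[hop] succeeding forces hop < len(path), so fuel > 0).
def path_check_go (path : List Int) (data_s : List (Int × List (Int × List Int))) : Nat → Int → Int → List Int
  | fuel, s, hop =>
    if path.length = hop then [s]
    else
      match PySem.List.pyGet? path hop with
      | none => []  -- Python raises IndexError here; excluded by Pre_path_check
      | some r =>
        match (PySem.Dict.mk data_s).get? s with
        | none => []
        | some inner =>
          match (PySem.Dict.mk inner).get? r with
          | none => []
          | some os =>
            match fuel with
            | 0 => []  -- unreachable: see the fuel comment above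
            | fuel' + 1 =>
              os.foldl (fun found o => found ++ path_check_go path data_s fuel' o (hop + 1)) []

def path_check (s : Int) (path : List Int) (hop : Int) (data_s : List (Int × List (Int × List Int))) : List Int :=
  path_check_go path data_s ((path.length : Int) - hop).toNat s hop

-- ===== PORT B =====
def path_check_alt (s : Int) (path : List Int) (hop : Int) (data_s : List (Int × List (Int × List Int))) : List Int :=
  (PySem.List.pyRange hop (path.length : Int) 1).foldl
    (fun frontier h =>
      frontier.flatMap (fun n =>
        (PySem.Dict.mk ((PySem.Dict.mk data_s).getD n [])).getD (PySem.List.pyGetD path h 0) []))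
    [s]

-- ===== PRECONDITION & SPEC =====
-- Pre_: A raises IndexError at path[hop] unless -len(path) ≤ hop ≤ len(path) (negative hops wrap; each level increments hop).
def Pre_path_check (s : Int) (path : List Int) (hop : Int) (data_s : List (Int × List (Int × List Int))) : Prop :=
  -(path.length : Int) ≤ hop ∧ hop ≤ (path.length : Int)
instance (s : Int) (path : List Int) (hop : Int) (data_s : List (Int × List (Int × List Int))) : Decidable (Pre_path_check s path hop data_s) := by unfold Pre_path_check; infer_instance

def pvWitness_path_check : Int × List Int × Int × (List (Int × List (Int × List Int))) :=
  (1, [5, 6], 0, [(1, [(5, [2, 3])]), (2, [(6, [7, 1])]), (3, [(6, [9])])])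

def Spec_path_check (s : Int) (path : List Int) (hop : Int) (data_s : List (Int × List (Int × List Int))) (out : List Int) : Prop := out = path_check_alt s path hop data_s
instance (s : Int) (path : List Int) (hop : Int) (data_s : List (Int × List (Int × List Int))) (out : List Int) : Decidable (Spec_path_check s path hop data_s out) := by unfold Spec_path_check; infer_instance

-- ===== CLAIM (what is proved, stated in full; the proofs are below) =====
def Claim_equal_path_check : Prop := ∀ (s : Int) (path : List Int) (hop : Int) (data_s : List (Int × List (Int × List Int))), Dom_path_check s path hop data_s → Pre_path_check s path hop data_s → Spec_path_check s path hop data_s (path_check s path hop data_s)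

-- ===== LEMMAS AND PROOFS =====

-- the children of node n at hop h, as B computes them
def pvChildren (path : List Int) (data_s : List (Int × List (Int × List Int))) (n h : Int) : List Int :=
  (PySem.Dict.mk ((PySem.Dict.mk data_s).getD n [])).getD (PySem.List.pyGetD path h 0) []

lemma path_check_base (path : List Int) (data_s : List (Int × List (Int × List Int))) (n : Int) :
    path_check n path (path.length : Int) data_s = [n] := by
  rw [path_check, path_check_go]
  simp

lemma path_check_step (path : List Int) (data_s : List (Int × List (Int × List Int))) (n h : Int)
    (hlo : -(path.length : Int) ≤ h) (hhi : h < (path.length : Int)) :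
    path_check n path h data_s
      = (pvChildren path data_s n h).flatMap (fun o => path_check o path (h + 1) data_s) := by
  obtain ⟨k, hk⟩ : ∃ k, (((path.length : Int) - h).toNat) = k + 1 := ⟨(((path.length : Int) - h).toNat) - 1, by omega⟩
  have hk' : k = (((path.length : Int) - (h + 1)).toNat) := by omega
  rw [path_check, hk, path_check_go, if_neg (show ¬((path.length : Int) = h) by omega)]
  split
  · next heq =>
    rw [PySem.List.pyGet?_eq_none_iff] at heq
    simp only [PySem.Raise.InRange, not_and, not_lt] at heq
    omega
  · next r heq =>
    have hrD : PySem.List.pyGetD path h 0 = r := by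
      simp [PySem.List.pyGetD, heq]
    unfold pvChildren
    rw [hrD, PySem.Dict.getD_eq_get?_getD, PySem.Dict.getD_eq_get?_getD]
    split
    · next hs =>
      rw [hs]
      simp [PySem.Dict.get?]
    · next inner hs =>
      rw [hs, Option.getD_some]
      split
      · next hi =>
        rw [hi]
        rfl
      · next os hi =>
        rw [hi, Option.getD_some]
        show os.foldl (fun found o => found ++ path_check_go path data_s k o (h + 1)) [] = _
        rw [PySem.List.foldl_append_eq_flatMap]
        simp only [List.nil_append]
        congr 1
        funext o
        rw [path_check, hk']

lemma alt_loop_eq (path : List Int) (data_s : List (Int × List (Int × List Int))) :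
    ∀ (k : Nat) (h : Int) (front : List Int),
      (((path.length : Int) - h).toNat = k) → -(path.length : Int) ≤ h → h ≤ (path.length : Int) →
      (PySem.List.pyRange h (path.length : Int) 1).foldl
          (fun frontier hh => frontier.flatMap (fun n => pvChildren path data_s n hh)) front
        = front.flatMap (fun n => path_check n path h data_s) := by
  intro k
  induction k with
  | zero =>
    intro h front hk hlo hhi
    have hEq : h = (path.length : Int) := by omega
    subst hEq
    rw [PySem.List.pyRange_one_eq_nil (by omega)]
    simp [List.foldl_nil, path_check_base]
  | succ k ih =>
    intro h front hk hlo hhi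
    have hlt : h < (path.length : Int) := by omega
    rw [PySem.List.pyRange_one_cons hlt]
    rw [List.foldl_cons]
    rw [ih (h + 1) _ (by omega) (by omega) (by omega)]
    rw [List.flatMap_assoc]
    congr 1
    funext n
    exact (path_check_step path data_s n h hlo hlt).symm

-- ===== VERDICT (by name: the statement is the Claim_ definition above) =====
theorem path_check_spec : Claim_equal_path_check := by
  intro s path hop data_s _hDom hPre
  unfold Spec_path_check path_check_alt
  rw [show (fun (frontier : List Int) (h : Int) =>
        frontier.flatMap (fun n =>
          (PySem.Dict.mk ((PySem.Dict.mk data_s).getD n [])).getD (PySem.List.pyGetD path h 0) []))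
      = (fun frontier hh => frontier.flatMap (fun n => pvChildren path data_s n hh)) from rfl]
  rw [alt_loop_eq path data_s (((path.length : Int) - hop).toNat) hop [s] rfl hPre.1 hPre.2]
  simp
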